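-- pv_equiv track=rewrite | github.com/kaviyavarshini08/DAA0666 | chapter 6.py | subsets_with_element
-- ===== SOURCE A (Python) =====
-- def subsets_with_element(E, x):
--     result = []
--
--     def backtrack(start, current):
--         if x in current:
--             result.append(current[:])
--
--         for i in range(start, len(E)):
--             current.append(E[i])
--             backtrack(i + 1, current)
--             current.pop()
--
--     backtrack(0, [])
--     return result
--
-- E = [2, 3, 4, 5]
--
-- x = 3
-- ===== SOURCE B (Python) =====
-- def subsets_with_element(E, x):
--     result = []
--     stack = [(0, [])]
--     while stack:
--         start, current = stack.pop()
--         if x in current: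
--             result.append(current)
--         for i in range(len(E) - 1, start - 1, -1):
--             stack.append((i + 1, current + [E[i]]))
--     return result
-- ===== Notes on version B (the rewrite author's own statement) =====
-- stated objective: alternative
-- what changed: Replaces A's recursive backtracking (mutating a shared current list) with an iterative DFS over an explicit stack of (start, current) frames, pushing children in reverse index order to reproduce A's exact preorder.
import Mathlib
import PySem

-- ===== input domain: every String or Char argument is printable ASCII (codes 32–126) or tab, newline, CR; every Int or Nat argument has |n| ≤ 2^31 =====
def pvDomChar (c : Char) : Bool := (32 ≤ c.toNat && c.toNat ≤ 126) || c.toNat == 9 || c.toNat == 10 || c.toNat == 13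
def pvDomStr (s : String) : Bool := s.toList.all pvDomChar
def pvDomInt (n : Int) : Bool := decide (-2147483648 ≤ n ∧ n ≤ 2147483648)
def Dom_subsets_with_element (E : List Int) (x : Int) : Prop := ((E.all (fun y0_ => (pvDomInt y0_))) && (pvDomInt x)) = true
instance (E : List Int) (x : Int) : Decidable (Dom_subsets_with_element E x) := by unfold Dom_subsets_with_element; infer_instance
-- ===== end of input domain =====

-- B replaces A's recursive backtracking by an iterative DFS over an explicit stack of
-- (remaining-suffix, current-subset) frames, reproducing A's exact preorder; objective: alternative.

-- ===== PORT A =====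
-- A's backtrack(start, current): since the loop only reads E[start:], the index 'start'
-- is ported as the remaining suffix of E (exact: E[i] for i in range(start, len(E))
-- enumerates exactly that suffix).  backA = one call of backtrack; auxA = its for-loop.
mutual
def backA (x : Int) (current : List Int) (rest : List Int) : List (List Int) :=
  (if current.contains x then [current] else []) ++ auxA x current rest
  termination_by (rest.length, 1)
def auxA (x : Int) (current : List Int) : List Int → List (List Int)
  | [] => []
  | e :: rs => backA x (current ++ [e]) rs ++ auxA x current rs
  termination_by rest => (rest.length, 0)
end

def subsets_with_element (E : List Int) (x : Int) : List (List Int) :=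
  backA x [] E

-- ===== PORT B =====
-- B's frames (start, current) are ported as (remaining suffix of E, current), same
-- index-to-suffix correspondence as in port A.  childrenB builds, top of stack first,
-- the frames B pushes for i = start .. len(E)-1 (B pushes them in reverse so the
-- lowest index ends on top).
def childrenB (rest : List Int) (cur : List Int) : List (List Int × List Int) :=
  match rest with
  | [] => []
  | e :: rs => (rs, cur ++ [e]) :: childrenB rs cur

def measB (st : List (List Int × List Int)) : Nat :=
  (st.map (fun f => 2 ^ f.1.length)).sum

theorem measB_append (a b : List (List Int × List Int)) :
    measB (a ++ b) = measB a + measB b := by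
  simp [measB]

theorem measB_children (rest cur : List Int) :
    measB (childrenB rest cur) + 1 = 2 ^ rest.length := by
  induction rest generalizing cur with
  | nil => simp [childrenB, measB]
  | cons e rs ih =>
      simp only [childrenB, measB, List.map_cons, List.sum_cons, List.length_cons]
      have := ih cur
      simp only [measB] at this
      omega

def loopB (x : Int) : List (List Int × List Int) → List (List Int) → List (List Int)
  | [], res => res
  | (rest, cur) :: st, res =>
      loopB x (childrenB rest cur ++ st)
        (if cur.contains x then res ++ [cur] else res)
termination_by st _ => measB st
decreasing_by
  have h := measB_children rest cur
  have h2 : measB ((rest, cur) :: st) = 2 ^ rest.length + measB st := by simp [measB]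
  rw [measB_append, h2]; omega

def subsets_with_element_alt (E : List Int) (x : Int) : List (List Int) :=
  loopB x [(E, [])] []

-- ===== PRECONDITION & SPEC =====
def Spec_subsets_with_element (E : List Int) (x : Int) (out : List (List Int)) : Prop := out = subsets_with_element_alt E x
instance (E : List Int) (x : Int) (out : List (List Int)) : Decidable (Spec_subsets_with_element E x out) := by unfold Spec_subsets_with_element; infer_instance

-- ===== CLAIM (what is proved, stated in full; the proofs are below) =====
def Claim_equal_subsets_with_element : Prop := ∀ (E : List Int) (x : Int), Dom_subsets_with_element E x → Spec_subsets_with_element E x (subsets_with_element E x)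

-- ===== LEMMAS AND PROOFS =====

-- Processing the children of a frame accumulates exactly what A's for-loop (auxA) emits.
theorem loopB_children (x : Int) (rest : List Int) :
    ∀ (cur : List Int) (st : List (List Int × List Int)) (res : List (List Int)),
      loopB x (childrenB rest cur ++ st) res = loopB x st (res ++ auxA x cur rest) := by
  induction rest with
  | nil => intro cur st res; simp [childrenB, auxA]
  | cons e rs ih =>
      intro cur st res
      simp only [childrenB, auxA, List.cons_append]
      simp only [loopB]
      rw [ih (cur ++ [e]) (childrenB rs cur ++ st)]
      rw [ih cur st]
      by_cases h : x ∈ cur ++ [e] <;> simp [h, backA]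

-- Processing one frame accumulates exactly what one call of A's backtrack (backA) emits.
theorem loopB_frame (x : Int) (rest cur : List Int) (st : List (List Int × List Int))
    (res : List (List Int)) :
    loopB x ((rest, cur) :: st) res = loopB x st (res ++ backA x cur rest) := by
  simp only [loopB]
  rw [loopB_children]
  by_cases h : x ∈ cur <;> simp [h, backA]

-- ===== VERDICT (by name: the statement is the Claim_ definition above) =====
theorem subsets_with_element_spec : Claim_equal_subsets_with_element := by
  intro E x _
  unfold Spec_subsets_with_element subsets_with_element subsets_with_element_alt
  rw [loopB_frame]
  simp only [loopB]
  simp
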